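-- pv_equiv track=rewrite | github.com/HaoTse/BERT-textseg | utils/accuracy.py | convert_segeval_format
-- ===== SOURCE A (Python) =====
-- import operator
--
-- def convert_segeval_format(result, mask):
--     length = sum(mask)
--     result[-1] = 1 # initial the last element is segment point
--     ret = [0] + [i + 1 for i, x in enumerate(result) if x != 0]
--
--     if len(ret) == 1:
--         raise RuntimeError('Segeval format convert error')
--     else:
--         return tuple(map(operator.sub, ret[1:], ret[:-1]))
-- ===== SOURCE B (Python) =====
-- # One fused pass: emit each segment length as the boundary is met, instead of
-- # building the boundary-index list and then pairwise-subtracting.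
-- # Like A, mutates result in place (result[-1] = 1); the dead sum(mask) is dropped.
-- def convert_segeval_format(result, mask):
--     result[-1] = 1  # last element is always a segment point
--     segments = []
--     prev = 0
--     for i, x in enumerate(result):
--         if x != 0:
--             segments.append(i + 1 - prev)
--             prev = i + 1
--     return tuple(segments)
-- ===== Notes on version B (the rewrite author's own statement) =====
-- stated objective: simpler
-- what changed: Instead of materializing [0]+boundary-index list and then pairwise-subtracting ret[1:]-ret[:-1], B fuses everything into one pass that keeps a running prev and appends i+1-prev at each nonzero marker; the dead sum(mask) and the unreachable RuntimeError (result[-1]=1 guarantees a boundary) are dropped.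
import Mathlib
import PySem

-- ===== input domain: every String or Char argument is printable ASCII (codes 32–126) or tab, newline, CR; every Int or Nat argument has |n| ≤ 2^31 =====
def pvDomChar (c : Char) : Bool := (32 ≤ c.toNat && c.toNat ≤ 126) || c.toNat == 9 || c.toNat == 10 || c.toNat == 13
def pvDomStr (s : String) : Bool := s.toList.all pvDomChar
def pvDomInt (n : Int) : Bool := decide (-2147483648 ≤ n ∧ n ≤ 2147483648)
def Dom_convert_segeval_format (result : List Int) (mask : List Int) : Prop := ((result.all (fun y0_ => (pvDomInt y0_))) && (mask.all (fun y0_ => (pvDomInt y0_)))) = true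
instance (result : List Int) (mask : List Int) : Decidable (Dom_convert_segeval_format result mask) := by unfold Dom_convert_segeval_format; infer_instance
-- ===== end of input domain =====

-- B fuses the boundary-index list + pairwise subtraction into one running-prev pass
-- (objective: simpler); equivalence is about the RETURN value — both Pythons mutate
-- result[-1] identically.

-- ===== PORT A =====
def convert_segeval_format (result : List Int) (mask : List Int) : List Int :=
  let _length := mask.sum                    -- length = sum(mask) (dead)
  match result with
  | [] => []                                 -- result[-1] = 1 raises IndexError; excluded by Pre_
  | _ =>
    let r := result.dropLast ++ [1]          -- result after result[-1] = 1
    let ret : List Int :=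
      0 :: ((PySem.List.enumerate r).filterMap
              (fun p => if p.2 ≠ 0 then some (p.1 + 1) else none))
    if ret.length = 1 then []                -- raise RuntimeError (unreachable: last element is 1)
    else List.zipWith (· - ·) ret.tail ret.dropLast   -- map(sub, ret[1:], ret[:-1])

-- ===== PORT B =====
def convert_segeval_format_alt (result : List Int) (mask : List Int) : List Int :=
  if result.isEmpty then []                  -- result[-1] = 1 raises IndexError; excluded by Pre_
  else
    let r := result.dropLast ++ [1]          -- result after result[-1] = 1
    ((PySem.List.enumerate r).foldl
      (fun (st : Int × List Int) p =>
        if p.2 ≠ 0 then (p.1 + 1, st.2 ++ [p.1 + 1 - st.1]) else st)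
      (0, [])).2

-- ===== PRECONDITION & SPEC =====
-- A raises IndexError on result = [] (result[-1] = 1); nothing else is excluded.
def Pre_convert_segeval_format (result : List Int) (mask : List Int) : Prop := result ≠ []
instance (result : List Int) (mask : List Int) : Decidable (Pre_convert_segeval_format result mask) := by unfold Pre_convert_segeval_format; infer_instance
def pvWitness_convert_segeval_format : List Int × List Int := ([0, 1, 0], [1, 1, 1])
def Spec_convert_segeval_format (result : List Int) (mask : List Int) (out : List Int) : Prop := out = convert_segeval_format_alt result mask
instance (result : List Int) (mask : List Int) (out : List Int) : Decidable (Spec_convert_segeval_format result mask out) := by unfold Spec_convert_segeval_format; infer_instance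

-- ===== CLAIM (what is proved, stated in full; the proofs are below) =====
def Claim_equal_convert_segeval_format : Prop := ∀ (result : List Int) (mask : List Int), Dom_convert_segeval_format result mask → Pre_convert_segeval_format result mask → Spec_convert_segeval_format result mask (convert_segeval_format result mask)

-- ===== LEMMAS AND PROOFS =====

-- `diffs p l` = successive differences of p :: l
def pvDiffs : Int → List Int → List Int
  | _, [] => []
  | p, b :: bs => (b - p) :: pvDiffs b bs

theorem pvZipWith_diffs (l : List Int) (p : Int) :
    List.zipWith (· - ·) l (p :: l.dropLast) = pvDiffs p l := by
  induction l generalizing p with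
  | nil => rfl
  | cons b bs ih =>
    cases bs with
    | nil => rfl
    | cons c cs => simpa [pvDiffs, List.dropLast] using ih b

theorem pvFoldl_diffs (r : List Int) (k prev : Int) (acc : List Int) :
    ((PySem.List.enumerate r k).foldl
      (fun (st : Int × List Int) p =>
        if p.2 ≠ 0 then (p.1 + 1, st.2 ++ [p.1 + 1 - st.1]) else st)
      (prev, acc)).2
    = acc ++ pvDiffs prev
        ((PySem.List.enumerate r k).filterMap
          (fun p => if p.2 ≠ 0 then some (p.1 + 1) else none)) := by
  induction r generalizing k prev acc with
  | nil => simp [PySem.List.enumerate_nil, pvDiffs]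
  | cons x xs ih =>
    rw [PySem.List.enumerate_cons, List.foldl_cons, List.filterMap_cons]
    by_cases hx : x ≠ 0
    · rw [if_pos hx, if_pos hx, ih]
      simp [pvDiffs, List.append_assoc]
    · rw [if_neg hx, if_neg hx, ih]

-- ===== VERDICT (by name: the statement is the Claim_ definition above) =====
theorem convert_segeval_format_spec : Claim_equal_convert_segeval_format := by
  intro result mask _ hpre
  unfold Spec_convert_segeval_format convert_segeval_format convert_segeval_format_alt
  match result with
  | [] => exact absurd rfl hpre
  | y :: ys =>
    simp only []
    rw [pvFoldl_diffs, List.nil_append]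
    generalize ((PySem.List.enumerate ((y :: ys).dropLast ++ [1])).filterMap
        (fun p => if p.2 ≠ 0 then some (p.1 + 1) else none)) = bnds
    cases bnds with
    | nil => simp [pvDiffs]
    | cons a l =>
      rw [if_neg (by simp)]
      simpa [List.tail, List.dropLast] using pvZipWith_diffs (a :: l) 0
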